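-- pv_equiv track=rewrite | github.com/btwiamsujal/MedAether | app.py | calculate_health_status
-- ===== SOURCE A (Python) =====
-- def calculate_health_status(user):
--     """Calculate user's health status based on medical history and conditions"""
--     medical_history = user.get('medical_history', [])
--
--     # Serious conditions that require immediate medical attention
--     serious_conditions = [
--         'diabetes', 'heart disease', 'cancer', 'kidney disease', 'liver disease',
--         'stroke', 'heart attack', 'coronary artery disease', 'chronic kidney disease',
--         'cirrhosis', 'heart failure', 'chronic obstructive pulmonary disease', 'copd',
--         'tuberculosis', 'tb', 'hiv', 'aids', 'leukemia', 'lymphoma', 'brain tumor',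
--         'liver cancer', 'lung cancer', 'breast cancer', 'prostate cancer',
--         'chronic liver disease', 'end stage renal disease', 'cardiomyopathy',
--         'pulmonary embolism', 'deep vein thrombosis', 'aortic aneurysm'
--     ]
--
--     # Moderate conditions requiring monitoring
--     moderate_conditions = [
--         'hypertension', 'asthma', 'arthritis', 'thyroid', 'anxiety', 'depression',
--         'high blood pressure', 'high cholesterol', 'osteoporosis', 'fibromyalgia',
--         'migraines', 'sleep apnea', 'acid reflux', 'irritable bowel syndrome', 'ibs',
--         'rheumatoid arthritis', 'osteoarthritis', 'hypothyroidism', 'hyperthyroidism',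
--         'bipolar disorder', 'schizophrenia', 'epilepsy', 'seizures', 'chronic pain',
--         'psoriasis', 'eczema', 'crohn disease', 'ulcerative colitis', 'gallstones',
--         'kidney stones', 'chronic fatigue syndrome', 'lupus', 'multiple sclerosis',
--         'parkinson', 'alzheimer', 'dementia', 'glaucoma', 'cataracts'
--     ]
--
--     # Mild conditions that don't significantly affect daily life
--     mild_conditions = [
--         'allergies', 'seasonal allergies', 'mild asthma', 'occasional headaches',
--         'minor joint pain', 'occasional insomnia', 'hay fever', 'sinusitis',
--         'minor back pain', 'vitamin deficiency', 'iron deficiency', 'anemia'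
--     ]
--
--     if not medical_history:
--         return 'green'
--
--     # Check for serious conditions
--     for condition in serious_conditions:
--         for hist in medical_history:
--             if condition.lower() in hist.lower():
--                 return 'red'
--
--     # Check for moderate conditions
--     for condition in moderate_conditions:
--         for hist in medical_history:
--             if condition.lower() in hist.lower():
--                 return 'yellow'
--
--     # Check for mild conditions
--     for condition in mild_conditions:
--         for hist in medical_history:
--             if condition.lower() in hist.lower():
--                 return 'yellow'  # Even mild conditions warrant yellow status
--
--     # If medical history exists but no specific conditions matched, assume yellow
--     if medical_history:
--         return 'yellow'
--
--     # Default to green (healthy)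
--     return 'green'
-- ===== SOURCE B (Python) =====
-- # B: alternative decomposition — classify each history entry independently ('red' if it
-- # mentions a serious condition, else 'yellow'), then reduce with min(); 'green' only when
-- # the history is empty.  A's moderate/mild scans and fallthrough can only yield 'yellow',
-- # so per-entry classification + lexicographic min ('red' < 'yellow') gives A's value.
-- SERIOUS_CONDITIONS = [
--     'diabetes', 'heart disease', 'cancer', 'kidney disease', 'liver disease',
--     'stroke', 'heart attack', 'coronary artery disease', 'chronic kidney disease',
--     'cirrhosis', 'heart failure', 'chronic obstructive pulmonary disease', 'copd',
--     'tuberculosis', 'tb', 'hiv', 'aids', 'leukemia', 'lymphoma', 'brain tumor',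
--     'liver cancer', 'lung cancer', 'breast cancer', 'prostate cancer',
--     'chronic liver disease', 'end stage renal disease', 'cardiomyopathy',
--     'pulmonary embolism', 'deep vein thrombosis', 'aortic aneurysm'
-- ]
--
-- def _severity(entry):
--     text = entry.lower()
--     return 'red' if any(k in text for k in SERIOUS_CONDITIONS) else 'yellow'
--
-- def calculate_health_status(user):
--     return min(map(_severity, user.get('medical_history', [])), default='green')
-- ===== Notes on version B (the rewrite author's own statement) =====
-- stated objective: alternative
-- what changed: B classifies each history entry independently into 'red'/'yellow' (entry-wise, not keyword-outer scanning) and reduces with min() ('red' < 'yellow', default 'green' on empty), dropping A's moderate/mild passes and fallthrough which can only ever yield 'yellow'.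
import Mathlib
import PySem

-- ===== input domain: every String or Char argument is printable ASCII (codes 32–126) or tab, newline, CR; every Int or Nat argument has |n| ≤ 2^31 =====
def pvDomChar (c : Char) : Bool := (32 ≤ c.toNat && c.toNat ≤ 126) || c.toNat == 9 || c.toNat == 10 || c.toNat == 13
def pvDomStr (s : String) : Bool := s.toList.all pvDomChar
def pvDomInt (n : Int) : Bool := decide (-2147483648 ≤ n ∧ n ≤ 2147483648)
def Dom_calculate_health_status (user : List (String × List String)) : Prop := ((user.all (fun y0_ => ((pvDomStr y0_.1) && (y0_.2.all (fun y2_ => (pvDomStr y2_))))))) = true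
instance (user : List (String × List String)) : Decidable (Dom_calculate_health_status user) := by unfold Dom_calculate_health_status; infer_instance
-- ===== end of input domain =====

-- B classifies each history entry independently and reduces with min; A's moderate/mild scans can only yield "yellow", so the results agree (proved below).

-- ===== PORT A =====
def seriousConditions : List String := ["diabetes", "heart disease", "cancer", "kidney disease", "liver disease", "stroke", "heart attack", "coronary artery disease", "chronic kidney disease", "cirrhosis", "heart failure", "chronic obstructive pulmonary disease", "copd", "tuberculosis", "tb", "hiv", "aids", "leukemia", "lymphoma", "brain tumor", "liver cancer", "lung cancer", "breast cancer", "prostate cancer", "chronic liver disease", "end stage renal disease", "cardiomyopathy", "pulmonary embolism", "deep vein thrombosis", "aortic aneurysm"]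
def moderateConditions : List String := ["hypertension", "asthma", "arthritis", "thyroid", "anxiety", "depression", "high blood pressure", "high cholesterol", "osteoporosis", "fibromyalgia", "migraines", "sleep apnea", "acid reflux", "irritable bowel syndrome", "ibs", "rheumatoid arthritis", "osteoarthritis", "hypothyroidism", "hyperthyroidism", "bipolar disorder", "schizophrenia", "epilepsy", "seizures", "chronic pain", "psoriasis", "eczema", "crohn disease", "ulcerative colitis", "gallstones", "kidney stones", "chronic fatigue syndrome", "lupus", "multiple sclerosis", "parkinson", "alzheimer", "dementia", "glaucoma", "cataracts"]
def mildConditions : List String := ["allergies", "seasonal allergies", "mild asthma", "occasional headaches", "minor joint pain", "occasional insomnia", "hay fever", "sinusitis", "minor back pain", "vitamin deficiency", "iron deficiency", "anemia"]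

-- condition-outer / history-inner early-return loops, as in A
def scanConds (conds : List String) (mh : List String) : Bool :=
  conds.any (fun c => mh.any (fun h => PySem.Str.isIn (PySem.Str.lower c) (PySem.Str.lower h)))

def calculate_health_status (user : List (String × List String)) : String :=
  let medical_history := (PySem.Dict.mk user).getD "medical_history" []
  if medical_history = [] then "green"
  else if scanConds seriousConditions medical_history then "red"
  else if scanConds moderateConditions medical_history then "yellow"
  else if scanConds mildConditions medical_history then "yellow"
  else if medical_history ≠ [] then "yellow"
  else "green"

-- ===== PORT B =====
-- B: each entry is classified on its own ("red" if it contains a serious keyword, else "yellow"),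
-- and the per-entry verdicts are reduced with min (Python's min with default='green').
def pvSeverity (h : String) : String :=
  if seriousConditions.any (fun k => PySem.Str.isIn k (PySem.Str.lower h)) then "red" else "yellow"

def calculate_health_status_alt (user : List (String × List String)) : String :=
  match PySem.List.min? (((PySem.Dict.mk user).getD "medical_history" []).map pvSeverity) (fun x => x) with
  | none => "green"
  | some m => m

-- ===== PRECONDITION & SPEC =====
def Spec_calculate_health_status (user : List (String × List String)) (out : String) : Prop := out = calculate_health_status_alt user
instance (user : List (String × List String)) (out : String) : Decidable (Spec_calculate_health_status user out) := by unfold Spec_calculate_health_status; infer_instance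

-- ===== CLAIM (what is proved, stated in full; the proofs are below) =====
def Claim_equal_calculate_health_status : Prop := ∀ (user : List (String × List String)), Dom_calculate_health_status user → Spec_calculate_health_status user (calculate_health_status user)

-- ===== LEMMAS AND PROOFS =====
-- every serious-condition literal is already lowercase
lemma serious_lower : seriousConditions.all (fun c => PySem.Str.lower c == c) = true := by decide

-- swap the two `any`s and drop the (idempotent) lowering of the lowercase keywords:
-- A's keyword-outer scan equals B's entry-outer existence test
lemma scan_serious_eq (mh : List String) :
    scanConds seriousConditions mh = mh.any (fun h => seriousConditions.any (fun k => PySem.Str.isIn k (PySem.Str.lower h))) := by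
  unfold scanConds
  have hlow : ∀ c ∈ seriousConditions, PySem.Str.lower c = c := by
    intro c hc
    have := List.all_eq_true.mp serious_lower c hc
    simpa using this
  have hbe : ∀ a b : Bool, (a = true ↔ b = true) → a = b := by decide
  apply hbe
  simp only [List.any_eq_true]
  constructor
  · rintro ⟨c, hc, h, hh, hin⟩
    exact ⟨h, hh, c, hc, by rw [hlow c hc] at hin; exact hin⟩
  · rintro ⟨h, hh, c, hc, hin⟩
    exact ⟨c, hc, h, hh, by rw [hlow c hc]; exact hin⟩

lemma min_red_left : min ("red" : String) "yellow" = "red" := by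
  simp only [min_def, String.le_iff_toList_le]
  rw [if_pos (le_of_lt (by decide))]

lemma min_red_right : min ("yellow" : String) "red" = "red" := by
  simp only [min_def, String.le_iff_toList_le]
  rw [if_neg (by decide)]

lemma pvSeverity_red (h : String) :
    pvSeverity h = "red" ↔ seriousConditions.any (fun k => PySem.Str.isIn k (PySem.Str.lower h)) = true := by
  unfold pvSeverity
  split_ifs with hc
  · exact iff_of_true rfl hc
  · exact iff_of_false (by simp) hc

-- folding `min` over a list of "red"/"yellow" verdicts yields "red" iff a "red" occurs
lemma foldl_min_red_yellow (t : List String) (x : String)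
    (hx : x = "red" ∨ x = "yellow")
    (ht : ∀ y ∈ t, y = "red" ∨ y = "yellow") :
    t.foldl min x = if x = "red" ∨ "red" ∈ t then "red" else "yellow" := by
  induction t generalizing x with
  | nil => rcases hx with h | h <;> simp [h]
  | cons y t ih =>
    have hy := ht y (by simp)
    have ht' : ∀ z ∈ t, z = "red" ∨ z = "yellow" := fun z hz => ht z (by simp [hz])
    have hmin : min x y = "red" ∨ min x y = "yellow" := by
      rcases hx with h | h <;> rcases hy with h' | h' <;>
        simp [h, h', min_red_left, min_red_right]
    rw [List.foldl_cons, ih (min x y) hmin ht']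
    rcases hx with h | h <;> rcases hy with h' | h' <;>
      simp [h, h', min_red_left, min_red_right]

-- ===== VERDICT (by name: the statement is the Claim_ definition above) =====
theorem calculate_health_status_spec : Claim_equal_calculate_health_status := by
  intro user _
  unfold Spec_calculate_health_status calculate_health_status calculate_health_status_alt
  set mh := (PySem.Dict.mk user).getD "medical_history" [] with hmh
  cases mh with
  | nil => simp [PySem.List.min?]
  | cons h t =>
    simp only [List.map_cons, PySem.List.min?_id_cons]
    have hall : ∀ y ∈ t.map pvSeverity, y = "red" ∨ y = "yellow" := by
      intro y hy
      obtain ⟨z, _, rfl⟩ := List.mem_map.mp hy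
      unfold pvSeverity; split_ifs <;> simp
    have hs : pvSeverity h = "red" ∨ pvSeverity h = "yellow" := by
      unfold pvSeverity; split_ifs <;> simp
    rw [foldl_min_red_yellow _ _ hs hall]
    have hred : (pvSeverity h = "red" ∨ "red" ∈ t.map pvSeverity) ↔
        scanConds seriousConditions (h :: t) = true := by
      rw [scan_serious_eq]
      simp only [List.any_cons, Bool.or_eq_true, List.mem_map]
      constructor
      · rintro (hr | ⟨z, hz, hzr⟩)
        · exact Or.inl ((pvSeverity_red h).mp hr)
        · exact Or.inr (List.any_eq_true.mpr ⟨z, hz, by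
            have := (pvSeverity_red z).mp hzr
            simpa using this⟩)
      · rintro (hr | hr)
        · exact Or.inl ((pvSeverity_red h).mpr hr)
        · obtain ⟨z, hz, hzr⟩ := List.any_eq_true.mp hr
          exact Or.inr ⟨z, hz, (pvSeverity_red z).mpr (by simpa using hzr)⟩
    by_cases hscan : scanConds seriousConditions (h :: t) = true
    · rw [if_pos (hred.mpr hscan), hscan]
      simp
    · rw [if_neg (fun hc => hscan (hred.mp hc))]
      simp only [Bool.not_eq_true] at hscan
      rw [hscan]
      split_ifs <;> simp_all
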